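-- pv_equiv track=rewrite | github.com/CrowdingFaun624/Advent-of-Code-2025 | Days/Day1/Day1.py | get_total_zero_count
-- ===== SOURCE A (Python) =====
-- from typing import Sequence
--
-- def get_total_zero_count(rotations: Sequence[int]) -> int:
--     # absolutely diabolical
--     current:int = 50
--     count:int = 0
--     for rotation in rotations:
--         sign, value = (-1 if rotation < 0 else 1), abs(rotation)
--         for i in range(value):
--             current += sign
--             if current % 100 == 0:
--                 count += 1
--     return count
-- ===== SOURCE B (Python) =====
-- def get_total_zero_count(rotations):
--     current = 50
--     count = 0
--     for r in rotations:
--         new = current + r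
--         if r >= 0:
--             count += new // 100 - current // 100
--         else:
--             count += (current - 1) // 100 - (new - 1) // 100
--         current = new
--     return count
-- ===== Notes on version B (the rewrite author's own statement) =====
-- stated objective: faster
-- what changed: Replaces the unit-step inner loop over abs(rotation) with a closed-form floor-division count of multiples of 100 crossed per rotation.
import Mathlib
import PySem

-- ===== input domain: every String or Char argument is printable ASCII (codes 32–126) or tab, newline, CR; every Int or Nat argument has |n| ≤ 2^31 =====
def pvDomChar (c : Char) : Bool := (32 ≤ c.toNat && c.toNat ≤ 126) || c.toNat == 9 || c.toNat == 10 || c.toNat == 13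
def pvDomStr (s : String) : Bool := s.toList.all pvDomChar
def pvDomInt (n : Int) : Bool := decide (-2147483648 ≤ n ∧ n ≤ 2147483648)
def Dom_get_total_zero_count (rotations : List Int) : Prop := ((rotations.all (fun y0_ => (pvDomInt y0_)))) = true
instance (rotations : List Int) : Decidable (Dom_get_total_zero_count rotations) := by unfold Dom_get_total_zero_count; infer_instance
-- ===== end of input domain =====

-- B replaces A's unit-step inner loop with a closed-form floor-division count per rotation (asymptotically faster).

-- ===== PORT A =====
-- literal port: outer loop over rotations, inner loop of |rotation| unit steps, state (current, count)
def get_total_zero_count (rotations : List Int) : Int :=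
  let p : Int × Int := rotations.foldl (fun st rotation =>
    let sign : Int := if rotation < 0 then -1 else 1
    let value : Nat := rotation.natAbs
    (List.range value).foldl (fun st _ =>
      let current := st.1 + sign
      (current, if PySem.Int.mod current 100 = 0 then st.2 + 1 else st.2)) st) (50, 0)
  p.2

-- ===== PORT B =====
def get_total_zero_count_alt (rotations : List Int) : Int :=
  let p : Int × Int := rotations.foldl (fun st r =>
    let nw := st.1 + r
    let add : Int :=
      if 0 ≤ r then PySem.Int.floordiv nw 100 - PySem.Int.floordiv st.1 100
      else PySem.Int.floordiv (st.1 - 1) 100 - PySem.Int.floordiv (nw - 1) 100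
    (nw, st.2 + add)) (50, 0)
  p.2

-- ===== PRECONDITION & SPEC =====
def Spec_get_total_zero_count (rotations : List Int) (out : Int) : Prop := out = get_total_zero_count_alt rotations
instance (rotations : List Int) (out : Int) : Decidable (Spec_get_total_zero_count rotations out) := by unfold Spec_get_total_zero_count; infer_instance

-- ===== CLAIM (what is proved, stated in full; the proofs are below) =====
def Claim_equal_get_total_zero_count : Prop := ∀ (rotations : List Int), Dom_get_total_zero_count rotations → Spec_get_total_zero_count rotations (get_total_zero_count rotations)

-- ===== LEMMAS AND PROOFS =====

-- one unit step across d+1 hits a multiple of 100 exactly when the floor quotient increases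
theorem pv_step_fact (d : Int) :
    (if PySem.Int.mod (d + 1) 100 = 0 then (1 : Int) else 0) = (d + 1) / 100 - d / 100 := by
  rw [PySem.Int.mod_eq_emod_of_pos (by norm_num : (0:Int) < 100)]
  split_ifs with h <;> omega

-- A's inner loop, ascending: closed form
theorem pv_inner_up (n : Nat) (c k : Int) :
    (List.range n).foldl (fun (st : Int × Int) _ =>
      let current := st.1 + 1
      (current, if PySem.Int.mod current 100 = 0 then st.2 + 1 else st.2)) (c, k)
    = (c + n, k + ((c + n) / 100 - c / 100)) := by
  induction n with
  | zero => simp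
  | succ m ih =>
    rw [List.range_succ, List.foldl_append, ih]
    simp only [List.foldl_cons, List.foldl_nil]
    have := pv_step_fact (c + m)
    rw [Prod.mk.injEq]
    constructor
    · push_cast; ring
    · push_cast at this ⊢
      split_ifs at this ⊢ with h
      · omega
      · omega

-- A's inner loop, descending: closed form
theorem pv_inner_down (n : Nat) (c k : Int) :
    (List.range n).foldl (fun (st : Int × Int) _ =>
      let current := st.1 + (-1)
      (current, if PySem.Int.mod current 100 = 0 then st.2 + 1 else st.2)) (c, k)
    = (c - n, k + ((c - 1) / 100 - (c - n - 1) / 100)) := by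
  induction n with
  | zero => simp
  | succ m ih =>
    rw [List.range_succ, List.foldl_append, ih]
    simp only [List.foldl_cons, List.foldl_nil]
    have := pv_step_fact (c - m - 2)
    rw [Prod.mk.injEq]
    constructor
    · push_cast; ring
    · push_cast at this ⊢
      have e : c - ↑m + -1 = c - ↑m - 2 + 1 := by ring
      rw [e]
      split_ifs at this ⊢ with h
      · omega
      · omega

-- the two outer loop bodies agree on every state
theorem pv_body_eq (st : Int × Int) (r : Int) :
    (let sign : Int := if r < 0 then -1 else 1
     (List.range r.natAbs).foldl (fun (st : Int × Int) _ =>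
       let current := st.1 + sign
       (current, if PySem.Int.mod current 100 = 0 then st.2 + 1 else st.2)) st)
    = (let nw := st.1 + r
       let add : Int :=
         if 0 ≤ r then PySem.Int.floordiv nw 100 - PySem.Int.floordiv st.1 100
         else PySem.Int.floordiv (st.1 - 1) 100 - PySem.Int.floordiv (nw - 1) 100
       (nw, st.2 + add)) := by
  obtain ⟨c, k⟩ := st
  by_cases hr : r < 0
  · simp only [if_pos hr, if_neg (by omega : ¬ (0 : Int) ≤ r)]
    rw [pv_inner_down r.natAbs c k]
    rw [PySem.Int.floordiv_eq_ediv_of_pos (by norm_num : (0:Int) < 100),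
        PySem.Int.floordiv_eq_ediv_of_pos (by norm_num : (0:Int) < 100)]
    have : (r.natAbs : Int) = -r := by omega
    rw [this, Prod.mk.injEq]
    constructor <;> ring_nf
  · simp only [if_neg hr, if_pos (by omega : (0 : Int) ≤ r)]
    rw [pv_inner_up r.natAbs c k]
    rw [PySem.Int.floordiv_eq_ediv_of_pos (by norm_num : (0:Int) < 100),
        PySem.Int.floordiv_eq_ediv_of_pos (by norm_num : (0:Int) < 100)]
    have : (r.natAbs : Int) = r := by omega
    rw [this]

theorem pv_fold_eq (rotations : List Int) (st : Int × Int) :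
    rotations.foldl (fun (st : Int × Int) rotation =>
      let sign : Int := if rotation < 0 then -1 else 1
      let value : Nat := rotation.natAbs
      (List.range value).foldl (fun (st : Int × Int) _ =>
        let current := st.1 + sign
        (current, if PySem.Int.mod current 100 = 0 then st.2 + 1 else st.2)) st) st
    = rotations.foldl (fun (st : Int × Int) r =>
        let nw := st.1 + r
        let add : Int :=
          if 0 ≤ r then PySem.Int.floordiv nw 100 - PySem.Int.floordiv st.1 100
          else PySem.Int.floordiv (st.1 - 1) 100 - PySem.Int.floordiv (nw - 1) 100
        (nw, st.2 + add)) st := by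
  induction rotations generalizing st with
  | nil => rfl
  | cons r rs ih =>
    simp only [List.foldl_cons]
    rw [pv_body_eq st r]
    exact ih _

-- ===== VERDICT (by name: the statement is the Claim_ definition above) =====
theorem get_total_zero_count_spec : Claim_equal_get_total_zero_count := by
  intro rotations _
  unfold Spec_get_total_zero_count get_total_zero_count get_total_zero_count_alt
  rw [pv_fold_eq]
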